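-- pv_equiv track=rewrite | github.com/garbagetrash/aoc2017 | day03/part2.py | spiral_memory
-- ===== SOURCE A (Python) =====
-- def add_offset(x, y, vals):
--     try:
--         return vals[(x, y)]
--     except KeyError:
--         return 0
--
-- def sum_of_neighbors(pos, vals):
--     x1, y1 = pos
--     offsets = [(x, y) for x in [-1, 0, 1] for y in [-1, 0, 1]]
--
--     return sum([add_offset(x1 + x2, y1 + y2, vals) for x2, y2 in offsets])
--
-- def spiral_memory(input_value):
--     vals = {}
--     x = 0
--     y = 0
--     xlim = 1
--     ylim = 1
--     dx = 1
--     dy = 0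
--     while True:
--         if abs(dx) > 0 and abs(x) < xlim or abs(dy) > 0 and abs(y) < ylim:
--             pass
--         else:
--             # change direction
--             if dx > 0:
--                 dx = 0
--                 dy = 1
--             elif dx < 0:
--                 dx = 0
--                 dy = -1
--             elif dy > 0:
--                 dx = -1
--                 dy = 0
--             else:
--                 dx = 1
--                 dy = 0
--                 xlim += 1
--                 ylim += 1
--         pos = (x, y)
--         if pos in vals:
--             raise ValueError('Position {} should not already be in dictionary'.format(pos))
--         if pos != (0, 0):
--             vals[pos] = sum_of_neighbors(pos, vals)
--         else:
--             vals[pos] = 1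
--
--         if vals[pos] > input_value:
--             return vals[pos]
--
--         x += dx
--         y += dy
-- ===== SOURCE B (Python) =====
-- # B: no walk state and no dict -- cells are generated arithmetically per ring
-- # (ring k, offset m in [0, 8k)) via the closed-form _cell, values are kept in a
-- # flat list indexed by spiral index, and each neighbour is looked up through the
-- # closed-form inverse index _rank.
--
-- _OFFSETS = ((-1, -1), (-1, 0), (-1, 1), (0, -1), (0, 1), (1, -1), (1, 0), (1, 1))
--
-- def _cell(k, m):
--     # coordinates of the m-th cell of ring k (ring k starts at (k, 1-k))
--     if m <= 2 * k - 1: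
--         return k, 1 - k + m
--     if m <= 4 * k - 1:
--         return 3 * k - 1 - m, k
--     if m <= 6 * k - 1:
--         return -k, 5 * k - 1 - m
--     return m - 7 * k + 1, -k
--
-- def _rank(x, y):
--     # closed-form spiral index of the lattice point (x, y)
--     if x == 0 and y == 0:
--         return 0
--     if y <= 0 and 1 + y <= x <= 1 - y:
--         return (-y) * (4 * (1 - y) - 2) + (x - y)
--     if x >= 1 and 2 - x <= y <= x:
--         return (x - 1) * (4 * x - 2) + (2 * x - 1) + (y + x - 1)
--     if y >= 1 and -y <= x <= y - 1:
--         return (y - 1) * (4 * y - 2) + 2 * (2 * y - 1) + (y - x)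
--     return (-x - 1) * (-4 * x - 2) + (6 * (-x) - 2) + (-x - y)
--
-- def spiral_memory(input_value):
--     if input_value < 1:
--         return 1
--     vals = [1]
--     k, m = 1, 0
--     while True:
--         x, y = _cell(k, m)
--         v = 0
--         for ox, oy in _OFFSETS:
--             r = _rank(x + ox, y + oy)
--             if r < len(vals):
--                 v += vals[r]
--         if v > input_value:
--             return v
--         vals.append(v)
--         m += 1
--         if m == 8 * k:
--             k, m = k + 1, 0
-- ===== Notes on version B (the rewrite author's own statement) =====
-- stated objective: alternative
-- what changed: B drops A's stateful spiral walk and coordinate dict entirely: cells are enumerated arithmetically by (ring, offset) with a closed-form coordinate formula, values live in a flat list indexed by spiral index, and each neighbour is found through a closed-form inverse-index function instead of a dictionary lookup.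
import Mathlib
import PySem

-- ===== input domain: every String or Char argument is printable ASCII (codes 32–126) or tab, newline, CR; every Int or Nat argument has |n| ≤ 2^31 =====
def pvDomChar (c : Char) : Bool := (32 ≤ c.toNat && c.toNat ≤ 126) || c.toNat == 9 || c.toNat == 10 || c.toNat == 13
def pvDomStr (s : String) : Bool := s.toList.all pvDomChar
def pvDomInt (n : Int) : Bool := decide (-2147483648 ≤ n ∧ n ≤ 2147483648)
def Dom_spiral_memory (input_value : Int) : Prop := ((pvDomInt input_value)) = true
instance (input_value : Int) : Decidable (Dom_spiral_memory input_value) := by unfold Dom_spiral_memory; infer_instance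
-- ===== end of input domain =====

-- B replaces A's stateful spiral walk over a coordinate dict by an arithmetic
-- enumeration: cells are generated per ring by the closed-form _cell (ring k,
-- offset m), values live in a flat list indexed by spiral index, and neighbours
-- are looked up through the closed-form inverse-index _rank; objective: alternative.
-- Both loops are ported with a fuel counter (one unit per spiral cell); equal
-- fuel on both sides keeps the equivalence unconditional.

-- ===== PORT A =====
def addOffset (x y : Int) (vals : PySem.Dict (Int × Int) Int) : Int :=
  match vals.get? (x, y) with          -- try: vals[(x,y)] except KeyError: 0
  | some v => v
  | none => 0

def sumOfNeighbors (pos : Int × Int) (vals : PySem.Dict (Int × Int) Int) : Int :=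
  let offsets : List (Int × Int) :=
    [(-1, -1), (-1, 0), (-1, 1), (0, -1), (0, 0), (0, 1), (1, -1), (1, 0), (1, 1)]
  (offsets.map (fun o => addOffset (pos.1 + o.1) (pos.2 + o.2) vals)).foldl (· + ·) 0

def loopA (iv : Int) : Nat → PySem.Dict (Int × Int) Int → Int → Int → Int → Int → Int → Int → Option Int
  | 0, _, _, _, _, _, _, _ => none    -- fuel exhausted (never on |iv| ≤ 2^31)
  | fuel + 1, vals, x, y, xlim, ylim, dx, dy =>
    let t : Int × Int × Int × Int :=
      if (0 < |dx| ∧ |x| < xlim) ∨ (0 < |dy| ∧ |y| < ylim) then (dx, dy, xlim, ylim)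
      else if 0 < dx then (0, 1, xlim, ylim)
      else if dx < 0 then (0, -1, xlim, ylim)
      else if 0 < dy then (-1, 0, xlim, ylim)
      else (1, 0, xlim + 1, ylim + 1)
    let dx := t.1
    let dy := t.2.1
    let xlim := t.2.2.1
    let ylim := t.2.2.2
    let pos : Int × Int := (x, y)
    -- Python's "if pos in vals: raise ValueError" is an assertion that never fires
    -- (each position is visited exactly once); it is elided.
    let v : Int := if pos ≠ ((0 : Int), (0 : Int)) then sumOfNeighbors pos vals else 1
    let vals := vals.insert pos v
    if v > iv then some v
    else loopA iv fuel vals (x + dx) (y + dy) xlim ylim dx dy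

def spiral_memory (input_value : Int) : Int :=
  (loopA input_value 4294967296 PySem.Dict.empty 0 0 1 1 1 0).getD 0

-- ===== PORT B =====
-- _cell: coordinates of the m-th cell of ring k (ring k starts at (k, 1-k))
def cellB (k m : Int) : Int × Int :=
  if m ≤ 2 * k - 1 then (k, 1 - k + m)
  else if m ≤ 4 * k - 1 then (3 * k - 1 - m, k)
  else if m ≤ 6 * k - 1 then (-k, 5 * k - 1 - m)
  else (m - 7 * k + 1, -k)

-- _rank: closed-form spiral index of the lattice point (x, y)
def rankB (x y : Int) : Int :=
  if x = 0 ∧ y = 0 then 0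
  else if y ≤ 0 ∧ 1 + y ≤ x ∧ x ≤ 1 - y then
    (-y) * (4 * (1 - y) - 2) + (x - y)
  else if 1 ≤ x ∧ 2 - x ≤ y ∧ y ≤ x then
    (x - 1) * (4 * x - 2) + (2 * x - 1) + (y + x - 1)
  else if 1 ≤ y ∧ -y ≤ x ∧ x ≤ y - 1 then
    (y - 1) * (4 * y - 2) + 2 * (2 * y - 1) + (y - x)
  else
    (-x - 1) * (-4 * x - 2) + (6 * (-x) - 2) + (-x - y)

-- the for-loop over the eight neighbour offsets with the guarded list lookup;
-- vals[r] is PySem.List.pyGet? (exact: 0 ≤ r < len vals whenever the guard holds)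
def neighborSumB (x y : Int) (vals : List Int) : Int :=
  ([(-1, -1), (-1, 0), (-1, 1), (0, -1), (0, 1), (1, -1), (1, 0), (1, 1)] : List (Int × Int)).foldl
    (fun acc o =>
      let r := rankB (x + o.1) (y + o.2)
      if r < (vals.length : Int) then acc + (PySem.List.pyGet? vals r).getD 0 else acc) 0

def loopB (iv : Int) : Nat → Int → Int → List Int → Option Int
  | 0, _, _, _ => none                -- fuel exhausted (never on |iv| ≤ 2^31)
  | fuel + 1, k, m, vals =>
    let c := cellB k m
    let v := neighborSumB c.1 c.2 vals
    if v > iv then some v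
    else
      let vals := vals ++ [v]
      let m := m + 1
      if m = 8 * k then loopB iv fuel (k + 1) 0 vals
      else loopB iv fuel k m vals

def spiral_memory_alt (input_value : Int) : Int :=
  if input_value < 1 then 1
  else (loopB input_value 4294967295 1 0 [1]).getD 0

-- ===== PRECONDITION & SPEC =====
def Spec_spiral_memory (input_value : Int) (out : Int) : Prop := out = spiral_memory_alt input_value
instance (input_value : Int) (out : Int) : Decidable (Spec_spiral_memory input_value out) := by unfold Spec_spiral_memory; infer_instance

-- ===== CLAIM (what is proved, stated in full; the proofs are below) =====
def Claim_equal_spiral_memory : Prop := ∀ (input_value : Int), Dom_spiral_memory input_value → Spec_spiral_memory input_value (spiral_memory input_value)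

-- ===== LEMMAS AND PROOFS =====

-- Segment parametrisation of A's spiral walk: ring k ≥ 1 consists of four segments,
-- direction d = 0 (right, length 2k-1), 1 (up, 2k-1), 2 (left, 2k), 3 (down, 2k);
-- cell i of a segment (1 ≤ i ≤ length) is start + i·dir.
def dirP (d : Int) : Int × Int :=
  if d = 0 then (1, 0) else if d = 1 then (0, 1) else if d = 2 then (-1, 0) else (0, -1)

def startP (d k : Int) : Int × Int :=
  if d = 0 then (1 - k, 1 - k) else if d = 1 then (k, 1 - k) else if d = 2 then (k, k) else (-k, k)

def segL (d k : Int) : Int := if d ≤ 1 then 2 * k - 1 else 2 * k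

def cellP (d k i : Int) : Int × Int :=
  ((startP d k).1 + i * (dirP d).1, (startP d k).2 + i * (dirP d).2)

-- spiral index of cell i of segment (d, k)
def rankVal (d k i : Int) : Int :=
  (k - 1) * (4 * k - 2) +
    (if d = 0 then i else if d = 1 then 2 * k - 1 + i
     else if d = 2 then 2 * (2 * k - 1) + i else 6 * k - 2 + i)

lemma rankB_cell (d k i : Int) (hk : 1 ≤ k) (hd0 : 0 ≤ d) (hd : d ≤ 3)
    (hi : 1 ≤ i) (hiL : i ≤ segL d k) :
    rankB (cellP d k i).1 (cellP d k i).2 = rankVal d k i := by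
  have hd4 : d = 0 ∨ d = 1 ∨ d = 2 ∨ d = 3 := by omega
  rcases hd4 with h | h | h | h <;> subst h <;>
    simp only [segL, cellP, startP, dirP, rankB, rankVal] at hiL ⊢ <;>
    norm_num at hiL ⊢ <;>
    split_ifs <;> omega

lemma cellP_ne_origin (d k i : Int) (hk : 1 ≤ k) (hd0 : 0 ≤ d) (hd : d ≤ 3)
    (hi : 1 ≤ i) (hiL : i ≤ segL d k) : cellP d k i ≠ ((0 : Int), (0 : Int)) := by
  have hd4 : d = 0 ∨ d = 1 ∨ d = 2 ∨ d = 3 := by omega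
  rcases hd4 with h | h | h | h <;> subst h <;>
    simp only [segL, cellP, startP, dirP, Prod.mk.injEq, ne_eq, not_and] at hiL ⊢ <;>
    norm_num at hiL ⊢ <;> omega

lemma rankB_nonneg (x y : Int) : 0 ≤ rankB x y := by
  unfold rankB
  split_ifs with h1 h2 h3 h4
  · omega
  · nlinarith
  · nlinarith
  · nlinarith
  · have hr : x ≤ -1 ∧ x ≤ y ∧ y ≤ -x - 1 := by omega
    nlinarith [hr.1, hr.2.1, hr.2.2]

lemma rankB_pos (x y : Int) (h : ¬ (x = 0 ∧ y = 0)) : 1 ≤ rankB x y := by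
  unfold rankB
  rw [if_neg h]
  split_ifs with h2 h3 h4
  · nlinarith
  · nlinarith
  · nlinarith
  · have hr : x ≤ -1 ∧ x ≤ y ∧ y ≤ -x - 1 := by omega
    nlinarith [hr.1, hr.2.1, hr.2.2]

lemma rankVal_pos (d k i : Int) (hk : 1 ≤ k) (hi : 1 ≤ i) : 1 ≤ rankVal d k i := by
  unfold rankVal
  have hb : 0 ≤ (k - 1) * (4 * k - 2) := by nlinarith
  split_ifs <;> omega

lemma rankVal_bounds (d k i : Int) (hk : 1 ≤ k) (hd : 0 ≤ d ∧ d ≤ 3)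
    (hi : 1 ≤ i) (hiL : i ≤ segL d k) :
    (k - 1) * (4 * k - 2) + 1 ≤ rankVal d k i ∧
      rankVal d k i ≤ (k - 1) * (4 * k - 2) + 8 * k - 2 := by
  unfold rankVal
  unfold segL at hiL
  generalize (k - 1) * (4 * k - 2) = B
  split_ifs at hiL ⊢ <;> omega

lemma rankVal_inj (d1 k1 i1 d2 k2 i2 : Int)
    (hk1 : 1 ≤ k1) (hd1 : 0 ≤ d1 ∧ d1 ≤ 3) (hi1 : 1 ≤ i1) (hiL1 : i1 ≤ segL d1 k1)
    (hk2 : 1 ≤ k2) (hd2 : 0 ≤ d2 ∧ d2 ≤ 3) (hi2 : 1 ≤ i2) (hiL2 : i2 ≤ segL d2 k2)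
    (h : rankVal d1 k1 i1 = rankVal d2 k2 i2) : d1 = d2 ∧ k1 = k2 ∧ i1 = i2 := by
  have hB1 := rankVal_bounds d1 k1 i1 hk1 hd1 hi1 hiL1
  have hB2 := rankVal_bounds d2 k2 i2 hk2 hd2 hi2 hiL2
  have hkk : k1 = k2 := by
    rcases lt_trichotomy k1 k2 with hlt | he | hgt
    · exfalso
      have hsep : (k1 - 1) * (4 * k1 - 2) + 8 * k1 - 2 < (k2 - 1) * (4 * k2 - 2) + 1 := by
        nlinarith [mul_le_mul_of_nonneg_right (by omega : (1:ℤ) ≤ k2 - k1) (by omega : (0:ℤ) ≤ k2 + k1)]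
      omega
    · exact he
    · exfalso
      have hsep : (k2 - 1) * (4 * k2 - 2) + 8 * k2 - 2 < (k1 - 1) * (4 * k1 - 2) + 1 := by
        nlinarith [mul_le_mul_of_nonneg_right (by omega : (1:ℤ) ≤ k1 - k2) (by omega : (0:ℤ) ≤ k1 + k2)]
      omega
  subst hkk
  refine ⟨?_, rfl, ?_⟩ <;>
  · unfold rankVal at h
    unfold segL at hiL1 hiL2
    generalize (k1 - 1) * (4 * k1 - 2) = B at h
    split_ifs at h hiL1 hiL2 <;> omega

-- rankB is the inverse of the cell parametrisation: a point with the rank of a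
-- spiral cell IS that cell
lemma rankB_eq_cell (x y d k i : Int) (hk : 1 ≤ k) (hd : 0 ≤ d ∧ d ≤ 3)
    (hi : 1 ≤ i) (hiL : i ≤ segL d k)
    (h : rankB x y = rankVal d k i) : (x, y) = cellP d k i := by
  have hpos := rankVal_pos d k i hk hi
  unfold rankB at h
  split_ifs at h with h0 h1 h2 h3
  · omega
  · have hr : rankVal 0 (1 - y) (x - y) = rankVal d k i := by
      rw [← h]; unfold rankVal; norm_num; try ring
    obtain ⟨hdd, hkk, hii⟩ := rankVal_inj 0 (1 - y) (x - y) d k i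
      (by omega) (by norm_num) (by omega) (by unfold segL; norm_num; omega)
      hk hd hi hiL hr
    rw [← hdd, ← hkk, ← hii]
    simp only [cellP, startP, dirP]
    norm_num
  · have hr : rankVal 1 x (y + x - 1) = rankVal d k i := by
      rw [← h]; unfold rankVal; norm_num; try ring
    obtain ⟨hdd, hkk, hii⟩ := rankVal_inj 1 x (y + x - 1) d k i
      (by omega) (by norm_num) (by omega) (by unfold segL; norm_num; omega)
      hk hd hi hiL hr
    rw [← hdd, ← hkk, ← hii]
    simp only [cellP, startP, dirP]
    norm_num
  · have hr : rankVal 2 y (y - x) = rankVal d k i := by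
      rw [← h]; unfold rankVal; norm_num; try ring
    obtain ⟨hdd, hkk, hii⟩ := rankVal_inj 2 y (y - x) d k i
      (by omega) (by norm_num) (by omega) (by unfold segL; norm_num; omega)
      hk hd hi hiL hr
    rw [← hdd, ← hkk, ← hii]
    simp only [cellP, startP, dirP]
    norm_num
  · have hr5 : x ≤ -1 ∧ x ≤ y ∧ y ≤ -x - 1 := by omega
    have hr : rankVal 3 (-x) (-x - y) = rankVal d k i := by
      rw [← h]; unfold rankVal; norm_num; try ring
    obtain ⟨hdd, hkk, hii⟩ := rankVal_inj 3 (-x) (-x - y) d k i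
      (by omega) (by norm_num) (by omega) (by unfold segL; norm_num; omega)
      hk hd hi hiL hr
    rw [← hdd, ← hkk, ← hii]
    simp only [cellP, startP, dirP]
    norm_num

lemma if_add_acc (c : Prop) [Decidable c] (acc t : Int) :
    (if c then acc + t else acc) = acc + (if c then t else 0) := by
  split_ifs <;> simp

lemma pyGet?_append_ne (L : List Int) (v r : Int) (h0 : 0 ≤ r) (hne : r ≠ (L.length : Int)) :
    PySem.List.pyGet? (L ++ [v]) r = PySem.List.pyGet? L r := by
  rw [PySem.List.pyGet?_of_nonneg (L ++ [v]) h0, PySem.List.pyGet?_of_nonneg L h0]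
  rcases lt_or_gt_of_ne hne with hlt | hgt
  · have h : r.toNat < L.length := by omega
    exact List.getElem?_append_left h
  · rw [List.getElem?_eq_none (by simp; omega), List.getElem?_eq_none (by omega)]

lemma pyGet?_big (L : List Int) (r : Int) (h0 : 0 ≤ r) (h1 : ¬ r < (L.length : Int)) :
    PySem.List.pyGet? L r = none := by
  rw [PySem.List.pyGet?_of_nonneg L h0, List.getElem?_eq_none (by omega)]

-- dict-list correspondence is preserved by inserting the current cell / appending
lemma hD_step (D : PySem.Dict (Int × Int) Int) (L : List Int) (v d k i : Int)
    (hk : 1 ≤ k) (hd : 0 ≤ d ∧ d ≤ 3) (hi : 1 ≤ i) (hiL : i ≤ segL d k)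
    (hlen : (L.length : Int) = rankVal d k i)
    (hD : ∀ x y : Int, D.get? (x, y) = PySem.List.pyGet? L (rankB x y)) :
    ∀ x y : Int, (D.insert (cellP d k i) v).get? (x, y) = PySem.List.pyGet? (L ++ [v]) (rankB x y) := by
  intro x y
  rw [PySem.Dict.get?_insert]
  by_cases he : (x, y) = cellP d k i
  · rw [if_pos he]
    have hx : x = (cellP d k i).1 := congrArg Prod.fst he
    have hy : y = (cellP d k i).2 := congrArg Prod.snd he
    have hrr : rankB x y = (L.length : Int) := by
      rw [hx, hy, rankB_cell d k i hk hd.1 hd.2 hi hiL, hlen]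
    rw [hrr, PySem.List.pyGet?_append_length]
  · rw [if_neg he, hD x y,
      pyGet?_append_ne L v (rankB x y) (rankB_nonneg x y)
        (fun hh => he (rankB_eq_cell x y d k i hk hd hi hiL (by rw [hh, hlen])))]

-- A's nine-offset sum over the dict equals B's guarded eight-neighbour list sum
lemma v_eq (x y : Int) (D : PySem.Dict (Int × Int) Int) (L : List Int)
    (hD : ∀ x y : Int, D.get? (x, y) = PySem.List.pyGet? L (rankB x y))
    (hc : PySem.List.pyGet? L (rankB x y) = none) :
    sumOfNeighbors (x, y) D = neighborSumB x y L := by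
  have key : ∀ a b : Int, addOffset a b D
      = (if rankB a b < (L.length : Int) then (PySem.List.pyGet? L (rankB a b)).getD 0 else 0) := by
    intro a b
    unfold addOffset
    rw [hD a b]
    by_cases hlt : rankB a b < (L.length : Int)
    · rw [if_pos hlt]
      cases PySem.List.pyGet? L (rankB a b) <;> rfl
    · rw [if_neg hlt, pyGet?_big L (rankB a b) (rankB_nonneg a b) hlt]
  unfold sumOfNeighbors neighborSumB
  simp only [List.map_cons, List.map_nil, List.foldl_cons, List.foldl_nil, key, if_add_acc]
  norm_num
  rw [hc]
  norm_num

-- which (ring, offset) B is at, given that its cell agrees with A's (d, k, i) cell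
lemma km_of (d k i κ m : Int) (hk : 1 ≤ k) (hd : 0 ≤ d ∧ d ≤ 3)
    (hi : 1 ≤ i) (hiL : i ≤ segL d k) (hκ : 1 ≤ κ) (hm : 0 ≤ m ∧ m < 8 * κ)
    (hcell : cellB κ m = cellP d k i) :
    (d = 0 ∧ i ≤ 2 * k - 2 ∧ κ = k - 1 ∧ m = 6 * (k - 1) + i - 1) ∨
    (d = 0 ∧ i = 2 * k - 1 ∧ κ = k ∧ m = 0) ∨
    (d = 1 ∧ κ = k ∧ m = i) ∨ (d = 2 ∧ κ = k ∧ m = 2 * k - 1 + i) ∨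
    (d = 3 ∧ κ = k ∧ m = 4 * k - 1 + i) := by
  have hd4 : d = 0 ∨ d = 1 ∨ d = 2 ∨ d = 3 := by omega
  unfold segL at hiL
  rcases hd4 with h | h | h | h <;> subst h <;>
    simp only [cellB, cellP, startP, dirP] at hcell <;>
    rw [Prod.mk.injEq] at hcell <;>
    norm_num at hiL hcell ⊢ <;>
    split_ifs at hcell <;> omega

-- the bisimulation: A's walk and B's ring enumeration advance one cell per fuel unit
lemma bisim (fuel : Nat) (iv : Int) (D : PySem.Dict (Int × Int) Int) (L : List Int)
    (d k i κ m : Int)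
    (hk : 1 ≤ k) (hd : 0 ≤ d ∧ d ≤ 3) (hi : 1 ≤ i) (hiL : i ≤ segL d k)
    (hκ : 1 ≤ κ) (hm : 0 ≤ m ∧ m < 8 * κ)
    (hcell : cellB κ m = cellP d k i)
    (hlen : (L.length : Int) = rankVal d k i)
    (hD : ∀ x y : Int, D.get? (x, y) = PySem.List.pyGet? L (rankB x y)) :
    loopA iv fuel D (cellP d k i).1 (cellP d k i).2 k k (dirP d).1 (dirP d).2
      = loopB iv fuel κ m L := by
  induction fuel generalizing D L d k i κ m with
  | zero => rfl
  | succ n ih =>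
    have hd4 : d = 0 ∨ d = 1 ∨ d = 2 ∨ d = 3 := by omega
    rcases hd4 with h | h | h | h <;> subst h
    · -- d = 0 (right / bottom segment)
      rcases km_of 0 k i κ m hk (by omega) hi hiL hκ hm hcell with
        ⟨_, hii, hκk, hmi⟩ | ⟨_, hii, hκk, hmi⟩ | ⟨hdd, _⟩ | ⟨hdd, _⟩ | ⟨hdd, _⟩
      · -- bottom of ring k-1 (i ≤ 2k-2): A moves straight
        rw [hκk] at hκ hm hcell ⊢
        rw [hmi] at hm hcell ⊢
        have hcur : cellP 0 k i = (1 - k + i, 1 - k) := by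
          simp [cellP, startP, dirP]
        have hrc : rankB (1 - k + i) (1 - k) = (L.length : Int) := by
          have hh := rankB_cell 0 k i hk (by omega) (by omega) hi hiL
          rw [hcur] at hh
          rw [hh, hlen]
        have hcnone : PySem.List.pyGet? L (rankB (1 - k + i) (1 - k)) = none :=
          pyGet?_big L _ (by rw [hrc]; positivity) (by rw [hrc]; omega)
        have hveq := v_eq (1 - k + i) (1 - k) D L hD hcnone
        have hne : ((1 - k + i : Int), (1 - k : Int)) ≠ ((0:Int), (0:Int)) := by
          have hno := cellP_ne_origin 0 k i hk (by omega) (by omega) hi hiL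
          rw [hcur] at hno; exact hno
        have hD' := hD_step D L (neighborSumB (1 - k + i) (1 - k) L) 0 k i hk (by omega) hi hiL hlen hD
        rw [hcur] at hD'
        have hlen' : (((L ++ [neighborSumB (1 - k + i) (1 - k) L]).length : Nat) : Int)
            = rankVal 0 k i + 1 := by
          rw [← hlen]; simp
        have hrv : rankVal 0 k (i + 1) = rankVal 0 k i + 1 := by
          unfold rankVal; norm_num; ring
        by_cases hroll : i = 2 * k - 2
        · -- last cell of ring k-1: B rolls over to ring k
          have hcell' : cellB (k - 1 + 1) 0 = cellP 0 k (i + 1) := by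
            simp only [cellB, cellP, startP, dirP]
            rw [if_pos (by omega)]
            norm_num
            all_goals omega
          have H := ih (D.insert ((1 - k + i : Int), (1 - k : Int)) (neighborSumB (1 - k + i) (1 - k) L))
            (L ++ [neighborSumB (1 - k + i) (1 - k) L]) 0 k (i + 1) (k - 1 + 1) 0
            hk (by omega) (by omega) (by simp [segL]; omega) (by omega) (by omega)
            hcell' (by rw [hlen', hrv]) hD'
          simp only [loopA, loopB, cellP, startP, dirP] at H ⊢
          rw [hcell, hcur]
          norm_num at H ⊢
          rw [if_pos (show |1 - k + i| < k by rw [abs_lt]; omega)]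
          norm_num
          rw [if_pos (show (1 - k + i = 0 → ¬1 - k = 0) from fun h1 h2 =>
            hne (Prod.ext_iff.mpr ⟨by simpa using h1, by simpa using h2⟩))]
          rw [hveq]
          by_cases hv : iv < neighborSumB (1 - k + i) (1 - k) L
          · rw [if_pos hv, if_pos hv]
          · rw [if_neg hv, if_neg hv, if_pos (show 6 * (k - 1) + i = 8 * (k - 1) by omega)]
            convert H using 2 <;> omega
        · -- still inside the bottom segment
          have hcell' : cellB (k - 1) (6 * (k - 1) + i - 1 + 1) = cellP 0 k (i + 1) := by
            simp only [cellB, cellP, startP, dirP]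
            rw [if_neg (by omega), if_neg (by omega), if_neg (by omega)]
            norm_num
            all_goals omega
          have H := ih (D.insert ((1 - k + i : Int), (1 - k : Int)) (neighborSumB (1 - k + i) (1 - k) L))
            (L ++ [neighborSumB (1 - k + i) (1 - k) L]) 0 k (i + 1) (k - 1) (6 * (k - 1) + i - 1 + 1)
            hk (by omega) (by omega) (by simp [segL]; omega) (by omega) (by omega)
            hcell' (by rw [hlen', hrv]) hD'
          simp only [loopA, loopB, cellP, startP, dirP] at H ⊢
          rw [hcell, hcur]
          norm_num at H ⊢
          rw [if_pos (show |1 - k + i| < k by rw [abs_lt]; omega)]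
          norm_num
          rw [if_pos (show (1 - k + i = 0 → ¬1 - k = 0) from fun h1 h2 =>
            hne (Prod.ext_iff.mpr ⟨by simpa using h1, by simpa using h2⟩))]
          rw [hveq]
          by_cases hv : iv < neighborSumB (1 - k + i) (1 - k) L
          · rw [if_pos hv, if_pos hv]
          · rw [if_neg hv, if_neg hv, if_neg (show ¬(6 * (k - 1) + i = 8 * (k - 1)) by omega)]
            convert H using 2 <;> omega
      · -- first cell of ring k (i = 2k-1): A turns up to d = 1
        rw [hκk] at hκ hm hcell ⊢
        rw [hmi] at hm hcell ⊢
        have hcur : cellP 0 k i = (1 - k + i, 1 - k) := by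
          simp [cellP, startP, dirP]
        have hrc : rankB (1 - k + i) (1 - k) = (L.length : Int) := by
          have hh := rankB_cell 0 k i hk (by omega) (by omega) hi hiL
          rw [hcur] at hh
          rw [hh, hlen]
        have hcnone : PySem.List.pyGet? L (rankB (1 - k + i) (1 - k)) = none :=
          pyGet?_big L _ (by rw [hrc]; positivity) (by rw [hrc]; omega)
        have hveq := v_eq (1 - k + i) (1 - k) D L hD hcnone
        have hne : ((1 - k + i : Int), (1 - k : Int)) ≠ ((0:Int), (0:Int)) := by
          have hno := cellP_ne_origin 0 k i hk (by omega) (by omega) hi hiL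
          rw [hcur] at hno; exact hno
        have hD' := hD_step D L (neighborSumB (1 - k + i) (1 - k) L) 0 k i hk (by omega) hi hiL hlen hD
        rw [hcur] at hD'
        have hlen' : (((L ++ [neighborSumB (1 - k + i) (1 - k) L]).length : Nat) : Int)
            = rankVal 0 k i + 1 := by
          rw [← hlen]; simp
        have hrv : rankVal 1 k 1 = rankVal 0 k i + 1 := by
          unfold rankVal; norm_num; omega
        have hcell' : cellB k (0 + 1) = cellP 1 k 1 := by
          simp only [cellB, cellP, startP, dirP]
          rw [if_pos (by omega)]
          norm_num
          all_goals omega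
        have H := ih (D.insert ((1 - k + i : Int), (1 - k : Int)) (neighborSumB (1 - k + i) (1 - k) L))
          (L ++ [neighborSumB (1 - k + i) (1 - k) L]) 1 k 1 k (0 + 1)
          hk (by omega) (by omega) (by simp [segL]; omega) (by omega) (by omega)
          hcell' (by rw [hlen', hrv]) hD'
        simp only [loopA, loopB, cellP, startP, dirP] at H ⊢
        rw [hcell, hcur]
        norm_num at H ⊢
        rw [if_neg (show ¬|1 - k + i| < k by rw [abs_lt]; omega)]
        norm_num
        rw [if_pos (show (1 - k + i = 0 → ¬1 - k = 0) from fun h1 h2 =>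
          hne (Prod.ext_iff.mpr ⟨by simpa using h1, by simpa using h2⟩))]
        rw [hveq]
        by_cases hv : iv < neighborSumB (1 - k + i) (1 - k) L
        · rw [if_pos hv, if_pos hv]
        · rw [if_neg hv, if_neg hv, if_neg (show ¬(1 = 8 * k) by omega)]
          convert H using 2 <;> omega
      · exact absurd hdd (by norm_num)
      · exact absurd hdd (by norm_num)
      · exact absurd hdd (by norm_num)
    · -- d = 1 (up segment)
      obtain ⟨hκk, hmi⟩ : κ = k ∧ m = i := by
        rcases km_of 1 k i κ m hk (by omega) hi hiL hκ hm hcell with h|h|h|h|h <;> omega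
      rw [hκk] at hκ hm hcell ⊢
      rw [hmi] at hm hcell ⊢
      have hcur : cellP 1 k i = (k, 1 - k + i) := by
        simp [cellP, startP, dirP]
      have hrc : rankB k (1 - k + i) = (L.length : Int) := by
        have hh := rankB_cell 1 k i hk (by omega) (by omega) hi hiL
        rw [hcur] at hh
        rw [hh, hlen]
      have hcnone : PySem.List.pyGet? L (rankB k (1 - k + i)) = none :=
        pyGet?_big L _ (by rw [hrc]; positivity) (by rw [hrc]; omega)
      have hveq := v_eq k (1 - k + i) D L hD hcnone
      have hne : ((k : Int), 1 - k + i) ≠ ((0:Int), (0:Int)) := by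
        have hno := cellP_ne_origin 1 k i hk (by omega) (by omega) hi hiL
        rw [hcur] at hno; exact hno
      have hD' := hD_step D L (neighborSumB k (1 - k + i) L) 1 k i hk (by omega) hi hiL hlen hD
      rw [hcur] at hD'
      have hlen' : (((L ++ [neighborSumB k (1 - k + i) L]).length : Nat) : Int)
          = rankVal 1 k i + 1 := by
        rw [← hlen]; simp
      rcases eq_or_lt_of_le hiL with hL | hL
      · -- segment end: i = 2k-1, A turns to d = 2; B advances to m = 2k
        have hi2 : i = 2 * k - 1 := by simpa [segL] using hL
        have hcell' : cellB k (i + 1) = cellP 2 k 1 := by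
          simp only [cellB, cellP, startP, dirP]
          rw [if_neg (by omega), if_pos (by omega)]
          norm_num
          all_goals omega
        have hrv : rankVal 2 k 1 = rankVal 1 k i + 1 := by
          unfold rankVal; norm_num; omega
        have H := ih (D.insert ((k : Int), 1 - k + i) (neighborSumB k (1 - k + i) L))
          (L ++ [neighborSumB k (1 - k + i) L]) 2 k 1 k (i + 1)
          hk (by omega) (by omega) (by simp [segL]; omega) (by omega) (by omega)
          hcell' (by rw [hlen', hrv]) hD'
        simp only [loopA, loopB, cellP, startP, dirP] at H ⊢
        rw [hcell, hcur]
        norm_num at H ⊢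
        rw [if_neg (show ¬|1 - k + i| < k by rw [abs_lt]; omega)]
        norm_num
        rw [if_pos (show (k = 0 → ¬1 - k + i = 0) from fun h1 h2 =>
          hne (Prod.ext_iff.mpr ⟨by simpa using h1, by simpa using h2⟩))]
        rw [hveq]
        by_cases hv : iv < neighborSumB k (1 - k + i) L
        · rw [if_pos hv, if_pos hv]
        · rw [if_neg hv, if_neg hv, if_neg (show ¬(i + 1 = 8 * k) by omega)]
          convert H using 2 <;> omega
      · -- mid-segment: straight move
        have hLL : i < 2 * k - 1 := by simpa [segL] using hL
        have hcell' : cellB k (i + 1) = cellP 1 k (i + 1) := by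
          simp only [cellB, cellP, startP, dirP]
          rw [if_pos (by omega)]
          norm_num
          all_goals omega
        have hrv : rankVal 1 k (i + 1) = rankVal 1 k i + 1 := by
          unfold rankVal; norm_num; omega
        have H := ih (D.insert ((k : Int), 1 - k + i) (neighborSumB k (1 - k + i) L))
          (L ++ [neighborSumB k (1 - k + i) L]) 1 k (i + 1) k (i + 1)
          hk (by omega) (by omega) (by simp [segL]; omega) (by omega) (by omega)
          hcell' (by rw [hlen', hrv]) hD'
        simp only [loopA, loopB, cellP, startP, dirP] at H ⊢
        rw [hcell, hcur]
        norm_num at H ⊢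
        rw [if_pos (show |1 - k + i| < k by rw [abs_lt]; omega)]
        norm_num
        rw [if_pos (show (k = 0 → ¬1 - k + i = 0) from fun h1 h2 =>
          hne (Prod.ext_iff.mpr ⟨by simpa using h1, by simpa using h2⟩))]
        rw [hveq]
        by_cases hv : iv < neighborSumB k (1 - k + i) L
        · rw [if_pos hv, if_pos hv]
        · rw [if_neg hv, if_neg hv, if_neg (show ¬(i + 1 = 8 * k) by omega)]
          convert H using 2 <;> omega
    · -- d = 2 (left segment)
      obtain ⟨hκk, hmi⟩ : κ = k ∧ m = 2 * k - 1 + i := by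
        rcases km_of 2 k i κ m hk (by omega) hi hiL hκ hm hcell with h|h|h|h|h <;> omega
      rw [hκk] at hκ hm hcell ⊢
      rw [hmi] at hm hcell ⊢
      have hcur : cellP 2 k i = (k - i, k) := by
        simp only [cellP, startP, dirP]
        norm_num
        ring
      have hrc : rankB (k - i) k = (L.length : Int) := by
        have hh := rankB_cell 2 k i hk (by omega) (by omega) hi hiL
        rw [hcur] at hh
        rw [hh, hlen]
      have hcnone : PySem.List.pyGet? L (rankB (k - i) k) = none :=
        pyGet?_big L _ (by rw [hrc]; positivity) (by rw [hrc]; omega)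
      have hveq := v_eq (k - i) k D L hD hcnone
      have hne : ((k - i : Int), (k : Int)) ≠ ((0:Int), (0:Int)) := by
        have hno := cellP_ne_origin 2 k i hk (by omega) (by omega) hi hiL
        rw [hcur] at hno; exact hno
      have hD' := hD_step D L (neighborSumB (k - i) k L) 2 k i hk (by omega) hi hiL hlen hD
      rw [hcur] at hD'
      have hlen' : (((L ++ [neighborSumB (k - i) k L]).length : Nat) : Int)
          = rankVal 2 k i + 1 := by
        rw [← hlen]; simp
      rcases eq_or_lt_of_le hiL with hL | hL
      · -- segment end: i = 2k, A turns to d = 3; B advances to m = 4k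
        have hi2 : i = 2 * k := by simpa [segL] using hL
        have hcell' : cellB k (2 * k - 1 + i + 1) = cellP 3 k 1 := by
          simp only [cellB, cellP, startP, dirP]
          rw [if_neg (by omega), if_neg (by omega), if_pos (by omega)]
          norm_num
          all_goals omega
        have hrv : rankVal 3 k 1 = rankVal 2 k i + 1 := by
          unfold rankVal; norm_num; omega
        have H := ih (D.insert ((k - i : Int), (k : Int)) (neighborSumB (k - i) k L))
          (L ++ [neighborSumB (k - i) k L]) 3 k 1 k (2 * k - 1 + i + 1)
          hk (by omega) (by omega) (by simp [segL]; omega) (by omega) (by omega)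
          hcell' (by rw [hlen', hrv]) hD'
        simp only [loopA, loopB, cellP, startP, dirP] at H ⊢
        rw [hcell, hcur]
        norm_num at H ⊢
        rw [show k + -i = k - i from by ring]
        rw [if_neg (show ¬|k - i| < k by rw [abs_lt]; omega)]
        norm_num
        rw [if_pos (show (k - i = 0 → ¬k = 0) from fun h1 h2 =>
          hne (Prod.ext_iff.mpr ⟨by simpa using h1, by simpa using h2⟩))]
        rw [hveq]
        by_cases hv : iv < neighborSumB (k - i) k L
        · rw [if_pos hv, if_pos hv]
        · rw [if_neg hv, if_neg hv, if_neg (show ¬(2 * k - 1 + i + 1 = 8 * k) by omega)]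
          convert H using 2 <;> omega
      · -- mid-segment: straight move
        have hLL : i < 2 * k := by simpa [segL] using hL
        have hcell' : cellB k (2 * k - 1 + i + 1) = cellP 2 k (i + 1) := by
          simp only [cellB, cellP, startP, dirP]
          rw [if_neg (by omega), if_pos (by omega)]
          norm_num
          all_goals omega
        have hrv : rankVal 2 k (i + 1) = rankVal 2 k i + 1 := by
          unfold rankVal; norm_num; omega
        have H := ih (D.insert ((k - i : Int), (k : Int)) (neighborSumB (k - i) k L))
          (L ++ [neighborSumB (k - i) k L]) 2 k (i + 1) k (2 * k - 1 + i + 1)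
          hk (by omega) (by omega) (by simp [segL]; omega) (by omega) (by omega)
          hcell' (by rw [hlen', hrv]) hD'
        simp only [loopA, loopB, cellP, startP, dirP] at H ⊢
        rw [hcell, hcur]
        norm_num at H ⊢
        rw [show k + -i = k - i from by ring]
        rw [if_pos (show |k - i| < k by rw [abs_lt]; omega)]
        norm_num
        rw [if_pos (show (k - i = 0 → ¬k = 0) from fun h1 h2 =>
          hne (Prod.ext_iff.mpr ⟨by simpa using h1, by simpa using h2⟩))]
        rw [hveq]
        by_cases hv : iv < neighborSumB (k - i) k L
        · rw [if_pos hv, if_pos hv]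
        · rw [if_neg hv, if_neg hv, if_neg (show ¬(2 * k - 1 + i + 1 = 8 * k) by omega)]
          convert H using 2 <;> omega
    · -- d = 3 (down segment)
      obtain ⟨hκk, hmi⟩ : κ = k ∧ m = 4 * k - 1 + i := by
        rcases km_of 3 k i κ m hk (by omega) hi hiL hκ hm hcell with h|h|h|h|h <;> omega
      rw [hκk] at hκ hm hcell ⊢
      rw [hmi] at hm hcell ⊢
      have hcur : cellP 3 k i = (-k, k - i) := by
        simp only [cellP, startP, dirP]
        norm_num
        ring
      have hrc : rankB (-k) (k - i) = (L.length : Int) := by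
        have hh := rankB_cell 3 k i hk (by omega) (by omega) hi hiL
        rw [hcur] at hh
        rw [hh, hlen]
      have hcnone : PySem.List.pyGet? L (rankB (-k) (k - i)) = none :=
        pyGet?_big L _ (by rw [hrc]; positivity) (by rw [hrc]; omega)
      have hveq := v_eq (-k) (k - i) D L hD hcnone
      have hne : ((-k : Int), (k - i : Int)) ≠ ((0:Int), (0:Int)) := by
        have hno := cellP_ne_origin 3 k i hk (by omega) (by omega) hi hiL
        rw [hcur] at hno; exact hno
      have hD' := hD_step D L (neighborSumB (-k) (k - i) L) 3 k i hk (by omega) hi hiL hlen hD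
      rw [hcur] at hD'
      have hlen' : (((L ++ [neighborSumB (-k) (k - i) L]).length : Nat) : Int)
          = rankVal 3 k i + 1 := by
        rw [← hlen]; simp
      rcases eq_or_lt_of_le hiL with hL | hL
      · -- segment end: i = 2k, A turns to d = 0 on ring k+1; B advances to m = 6k
        have hi2 : i = 2 * k := by simpa [segL] using hL
        have hcell' : cellB k (4 * k - 1 + i + 1) = cellP 0 (k + 1) 1 := by
          simp only [cellB, cellP, startP, dirP]
          rw [if_neg (by omega), if_neg (by omega), if_neg (by omega)]
          norm_num
          all_goals omega
        have hrv : rankVal 0 (k + 1) 1 = rankVal 3 k i + 1 := by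
          unfold rankVal; norm_num; nlinarith
        have H := ih (D.insert ((-k : Int), (k - i : Int)) (neighborSumB (-k) (k - i) L))
          (L ++ [neighborSumB (-k) (k - i) L]) 0 (k + 1) 1 k (4 * k - 1 + i + 1)
          (by omega) (by omega) (by omega) (by simp [segL]; omega) (by omega) (by omega)
          hcell' (by rw [hlen', hrv]) hD'
        simp only [loopA, loopB, cellP, startP, dirP] at H ⊢
        rw [hcell, hcur]
        norm_num at H ⊢
        rw [show k + -i = k - i from by ring]
        rw [if_neg (show ¬|k - i| < k by rw [abs_lt]; omega)]
        norm_num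
        rw [if_pos (show (k = 0 → ¬k - i = 0) from fun h1 h2 =>
          hne (Prod.ext_iff.mpr ⟨by omega, by simpa using h2⟩))]
        rw [hveq]
        by_cases hv : iv < neighborSumB (-k) (k - i) L
        · rw [if_pos hv, if_pos hv]
        · rw [if_neg hv, if_neg hv, if_neg (show ¬(4 * k - 1 + i + 1 = 8 * k) by omega)]
          convert H using 2 <;> omega
      · -- mid-segment: straight move
        have hLL : i < 2 * k := by simpa [segL] using hL
        have hcell' : cellB k (4 * k - 1 + i + 1) = cellP 3 k (i + 1) := by
          simp only [cellB, cellP, startP, dirP]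
          rw [if_neg (by omega), if_neg (by omega), if_pos (by omega)]
          norm_num
          all_goals omega
        have hrv : rankVal 3 k (i + 1) = rankVal 3 k i + 1 := by
          unfold rankVal; norm_num; omega
        have H := ih (D.insert ((-k : Int), (k - i : Int)) (neighborSumB (-k) (k - i) L))
          (L ++ [neighborSumB (-k) (k - i) L]) 3 k (i + 1) k (4 * k - 1 + i + 1)
          hk (by omega) (by omega) (by simp [segL]; omega) (by omega) (by omega)
          hcell' (by rw [hlen', hrv]) hD'
        simp only [loopA, loopB, cellP, startP, dirP] at H ⊢
        rw [hcell, hcur]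
        norm_num at H ⊢
        rw [show k + -i = k - i from by ring]
        rw [if_pos (show |k - i| < k by rw [abs_lt]; omega)]
        norm_num
        rw [if_pos (show (k = 0 → ¬k - i = 0) from fun h1 h2 =>
          hne (Prod.ext_iff.mpr ⟨by omega, by simpa using h2⟩))]
        rw [hveq]
        by_cases hv : iv < neighborSumB (-k) (k - i) L
        · rw [if_pos hv, if_pos hv]
        · rw [if_neg hv, if_neg hv, if_neg (show ¬(4 * k - 1 + i + 1 = 8 * k) by omega)]
          convert H using 2 <;> omega

-- ===== VERDICT (by name: the statement is the Claim_ definition above) =====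
theorem spiral_memory_spec : Claim_equal_spiral_memory := by
  intro iv _
  unfold Spec_spiral_memory spiral_memory spiral_memory_alt
  rw [show (4294967296 : Nat) = 4294967295 + 1 from by norm_num]
  rw [loopA]
  norm_num
  by_cases hv : iv < 1
  · rw [if_pos hv, if_pos hv]
    rfl
  · rw [if_neg hv, if_neg hv]
    have hD0 : ∀ x y : Int,
        ((PySem.Dict.empty : PySem.Dict (Int × Int) Int).insert ((0:Int),(0:Int)) 1).get? (x, y)
          = PySem.List.pyGet? [1] (rankB x y) := by
      intro x y
      rw [PySem.Dict.get?_insert]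
      by_cases h0 : (x, y) = ((0:Int), (0:Int))
      · rw [if_pos h0]
        have : rankB x y = 0 := by
          rcases Prod.mk.injEq .. ▸ h0 with ⟨hx, hy⟩
          simp [rankB, hx, hy]
        rw [this]; rfl
      · rw [if_neg h0, PySem.Dict.get?_empty]
        have h1 : 1 ≤ rankB x y := rankB_pos x y (by
          intro ⟨hx, hy⟩; exact h0 (by simp [hx, hy]))
        symm
        rw [PySem.List.pyGet?_eq_none_iff, PySem.Raise.InRange]
        simp
        omega
    have H := bisim 4294967295 iv (PySem.Dict.empty.insert ((0:Int),(0:Int)) 1) [1]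
      0 1 1 1 0 (by norm_num) (by norm_num) (by norm_num) (by simp [segL])
      (by norm_num) (by norm_num) (by decide) (by simp [rankVal]) hD0
    simp only [cellP, startP, dirP] at H
    norm_num at H
    rw [H]
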